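-- pv_equiv track=rewrite | github.com/j23n/photo-tools | src/photo_tools/helpers.py | _is_non_xmp_write_arg
-- ===== SOURCE A (Python) =====
-- _NON_XMP_GROUPS = ("IPTC:", "EXIF:", "QuickTime:", "MakerNotes:", "File:")
--
-- _WRITE_OPS = ("+=", "-=", "<=", ">=", "=")
--
-- def _is_non_xmp_write_arg(arg: str) -> bool:
--     """True if `arg` is `-Group:Tag<op>value` targeting a non-XMP group."""
--     if not arg.startswith("-") or len(arg) < 2:
--         return False
--     body = arg[1:]
--     for op in _WRITE_OPS:
--         if op in body:
--             tag = body.split(op, 1)[0]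
--             return any(tag.startswith(g) for g in _NON_XMP_GROUPS)
--     return False
-- ===== SOURCE B (Python) =====
-- _NON_XMP_GROUP_NAMES = frozenset({"IPTC", "EXIF", "QuickTime", "MakerNotes", "File"})
--
-- def _is_non_xmp_write_arg(arg: str) -> bool:
--     """True if `arg` is `-Group:Tag<op>value` targeting a non-XMP group."""
--     # Every write operator contains '=', and '=' alone is an operator, so an
--     # operator is present iff '=' occurs; the group is whatever precedes the
--     # first ':' of the body, looked up in a set of group names.
--     if len(arg) < 2 or arg[0] != '-':
--         return False
--     group, sep, _ = arg[1:].partition(':')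
--     return sep == ':' and '=' in arg and group in _NON_XMP_GROUP_NAMES
-- ===== Notes on version B (the rewrite author's own statement) =====
-- stated objective: simpler
-- what changed: B replaces A's try-each-operator split loop and five-way group-prefix scan by extraction: it partitions the body once at its first colon, looks the extracted group name up in a set, and tests for a single equals-sign character (correct because the equals sign occurs in every write operator and is itself one).
import Mathlib
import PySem

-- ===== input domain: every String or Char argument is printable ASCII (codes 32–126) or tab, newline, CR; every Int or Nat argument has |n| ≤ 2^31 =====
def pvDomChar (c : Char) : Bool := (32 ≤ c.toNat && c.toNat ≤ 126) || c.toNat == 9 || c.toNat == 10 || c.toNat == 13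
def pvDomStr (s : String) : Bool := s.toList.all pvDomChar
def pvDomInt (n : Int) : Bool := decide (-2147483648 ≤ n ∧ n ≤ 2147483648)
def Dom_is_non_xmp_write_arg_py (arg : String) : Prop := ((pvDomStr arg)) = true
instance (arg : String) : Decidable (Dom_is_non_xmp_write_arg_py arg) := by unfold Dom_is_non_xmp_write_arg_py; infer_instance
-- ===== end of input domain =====

-- B replaces A's try-each-operator split loop and five-way group-prefix scan by extraction: it
-- partitions the body at its first ':' once, looks the extracted name up in a set of group names,
-- and tests for the single character '=' (objective: simpler). Proved equal on all inputs.

-- ===== PORT A =====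
-- module constants _NON_XMP_GROUPS and _WRITE_OPS, as char lists
def pvGroups : List (List Char) :=
  [['I','P','T','C',':'], ['E','X','I','F',':'], ['Q','u','i','c','k','T','i','m','e',':'],
   ['M','a','k','e','r','N','o','t','e','s',':'], ['F','i','l','e',':']]

def pvOps : List (List Char) := [['+','='], ['-','='], ['<','='], ['>','='], ['=']]

-- the 'for op in _WRITE_OPS' loop; body.split(op, 1)[0] is exact: op ≠ "" so splitMax? is some,
-- and the split list is nonempty so [0] never raises (pyGet? is some)
def pvALoop (body : List Char) : List (List Char) → Bool
  | [] => false
  | op :: rest =>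
    if PySem.Chars.isIn op body then
      let tag := (PySem.List.pyGet? ((PySem.Chars.splitMax? body op 1).getD []) 0).getD []
      pvGroups.any (fun g => PySem.Chars.startswith tag g)
    else pvALoop body rest

def is_non_xmp_write_arg_py (arg : String) : Bool :=
  let cs := arg.toList
  if !PySem.Chars.startswith cs ['-'] || PySem.Chars.len cs < 2 then false
  else pvALoop (PySem.Chars.slice cs (some 1) none) pvOps

-- ===== PORT B =====
-- _NON_XMP_GROUP_NAMES = frozenset({"IPTC", "EXIF", "QuickTime", "MakerNotes", "File"})
def pvNames : List (List Char) :=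
  [['I','P','T','C'], ['E','X','I','F'], ['Q','u','i','c','k','T','i','m','e'],
   ['M','a','k','e','r','N','o','t','e','s'], ['F','i','l','e']]

-- s.partition(':') = (head, sep-found?, tail); exact port of str.partition with a one-char sep
def pvPartColon : List Char → List Char × Bool × List Char
  | [] => ([], false, [])
  | c :: rest =>
    if c = ':' then ([], true, rest)
    else
      let r := pvPartColon rest
      (c :: r.1, r.2.1, r.2.2)

def is_non_xmp_write_arg_py_alt (arg : String) : Bool :=
  let cs := arg.toList
  if PySem.Chars.len cs < 2 || !(PySem.List.pyGet? cs 0 == some '-') then false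
  else
    let p := pvPartColon (PySem.Chars.slice cs (some 1) none)
    p.2.1 && PySem.Chars.isIn ['='] cs && pvNames.any (fun n => n == p.1)

-- ===== PRECONDITION & SPEC =====
def Spec_is_non_xmp_write_arg_py (arg : String) (out : Bool) : Prop := out = is_non_xmp_write_arg_py_alt arg
instance (arg : String) (out : Bool) : Decidable (Spec_is_non_xmp_write_arg_py arg out) := by unfold Spec_is_non_xmp_write_arg_py; infer_instance

-- ===== CLAIM (what is proved, stated in full; the proofs are below) =====
def Claim_equal_is_non_xmp_write_arg_py : Prop := ∀ (arg : String), Dom_is_non_xmp_write_arg_py arg → Spec_is_non_xmp_write_arg_py arg (is_non_xmp_write_arg_py arg)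

-- ===== LEMMAS AND PROOFS =====

-- the characters of body before the first occurrence of sep (head of body.split(sep, 1))
def pvBefore (sep : List Char) : List Char → List Char
  | [] => []
  | c :: rest => if sep.isPrefixOf (c :: rest) then [] else c :: pvBefore sep rest

theorem pvGo_zero (sep : List Char) : ∀ fuel l acc,
    PySem.Chars.splitOnMax.go sep fuel 0 l [] acc = acc.reverse ++ [l] := by
  intro fuel l acc
  cases fuel with
  | zero => simp [PySem.Chars.splitOnMax.go]
  | succ f => cases l <;> simp [PySem.Chars.splitOnMax.go]

theorem pvGo_one (sep : List Char) : ∀ fuel l cur acc, l.length < fuel →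
    ∃ tail, PySem.Chars.splitOnMax.go sep fuel 1 l cur acc
      = acc.reverse ++ (cur.reverse ++ pvBefore sep l) :: tail := by
  intro fuel
  induction fuel with
  | zero => intro l cur acc h; omega
  | succ f ih =>
    intro l cur acc h
    cases l with
    | nil => exact ⟨[], by simp [PySem.Chars.splitOnMax.go, pvBefore]⟩
    | cons c rest =>
      by_cases hp : sep.isPrefixOf (c :: rest)
      · refine ⟨[List.drop sep.length (c :: rest)], ?_⟩
        simp only [PySem.Chars.splitOnMax.go, hp, if_true, pvBefore]
        rw [pvGo_zero]
        simp
      · have := ih rest (c :: cur) acc (by simpa using Nat.lt_of_succ_lt_succ h)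
        obtain ⟨tail, ht⟩ := this
        refine ⟨tail, ?_⟩
        simp only [PySem.Chars.splitOnMax.go, hp, if_false, pvBefore]
        rw [ht]
        simp

theorem pvSplit_head (body sep : List Char) (hsep : sep ≠ []) :
    (PySem.List.pyGet? ((PySem.Chars.splitMax? body sep 1).getD []) 0).getD [] = pvBefore sep body := by
  obtain ⟨tail, ht⟩ := pvGo_one sep (body.length + 1) body [] [] (by omega)
  simp only [PySem.Chars.splitMax?, PySem.Chars.splitOnMax]
  have hne : ¬ sep.isEmpty = true := by simpa [List.isEmpty_iff] using hsep
  simp only [hne, if_false]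
  norm_num
  rw [ht]
  simp [PySem.List.pyGet?, PySem.List.pyIdx?]

theorem pvBefore_prefix (sep l : List Char) : pvBefore sep l <+: l := by
  induction l with
  | nil => simp [pvBefore]
  | cons c rest ih =>
    by_cases hp : sep.isPrefixOf (c :: rest)
    · simp [pvBefore, hp]
    · simpa [pvBefore, hp] using ih

theorem pvBefore_keeps_prefix (h : Char) (sep' g : List Char) (hh : h ∉ g) :
    ∀ l, g <+: l → g <+: pvBefore (h :: sep') l := by
  induction g with
  | nil => intro l _; exact List.nil_prefix
  | cons a g' ih =>
    intro l hg
    obtain ⟨r, rfl⟩ := hg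
    have hp : ¬ (h :: sep').isPrefixOf (a :: (g' ++ r)) := by
      intro hc
      have : h = a := (List.cons_prefix_cons.mp (List.isPrefixOf_iff_prefix.mp hc)).1
      exact hh (this ▸ List.mem_cons_self)
    simp only [List.cons_append, pvBefore, hp, if_false]
    exact List.cons_prefix_cons.mpr ⟨rfl, ih (by simp at hh; tauto) (g' ++ r) (List.prefix_append _ _)⟩

-- literal facts about the module constants
theorem pvOps_ne_nil : ∀ op ∈ pvOps, op ≠ [] := by decide
theorem pvOps_head_not_in_group : ∀ op ∈ pvOps, ∀ g ∈ pvGroups, ∀ h ∈ op.take 1, h ∉ g := by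
  intro op hop g hg h hh
  fin_cases hop <;> fin_cases hg <;> simp_all
theorem pvOps_eq_infix : ∀ op ∈ pvOps, ['='] <:+: op := by decide
set_option maxRecDepth 8192 in
theorem pvNames_form : ∀ n ∈ pvNames, ':' ∉ n ∧ (n ++ [':']) ∈ pvGroups := by decide
set_option maxRecDepth 8192 in
theorem pvGroups_form : ∀ g ∈ pvGroups, ∃ n ∈ pvNames, g = n ++ [':'] := by decide

-- A's loop returns true only if some operator is in body and some group is a prefix of body
theorem pvALoop_true (body : List Char) : ∀ ops, (∀ op ∈ ops, op ≠ []) →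
    pvALoop body ops = true →
    (∃ op ∈ ops, op <:+: body) ∧ (∃ g ∈ pvGroups, g <+: body) := by
  intro ops
  induction ops with
  | nil => intro _ h; simp [pvALoop] at h
  | cons op rest ih =>
    intro hne h
    by_cases hin : PySem.Chars.isIn op body = true
    · simp only [pvALoop, hin, if_true, List.any_eq_true] at h
      obtain ⟨g, hg, hsw⟩ := h
      rw [pvSplit_head body op (hne op List.mem_cons_self)] at hsw
      have htag : g <+: pvBefore op body := (PySem.Chars.startswith_iff _ _).mp hsw
      refine ⟨⟨op, List.mem_cons_self, (PySem.Chars.isIn_iff_infix _ _).mp hin⟩,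
              ⟨g, hg, htag.trans (pvBefore_prefix op body)⟩⟩
    · simp only [pvALoop, hin, if_false] at h
      obtain ⟨⟨op', h1, h2⟩, hg⟩ := ih (fun o ho => hne o (List.mem_cons_of_mem _ ho)) h
      exact ⟨⟨op', List.mem_cons_of_mem _ h1, h2⟩, hg⟩

-- A's loop returns true whenever some group prefixes body and some operator occurs in body
theorem pvALoop_of (body : List Char) (g : List Char) (hg : g ∈ pvGroups) (hgp : g <+: body) :
    ∀ ops, (∀ op ∈ ops, op ∈ pvOps) → (∃ op ∈ ops, op <:+: body) →
    pvALoop body ops = true := by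
  intro ops
  induction ops with
  | nil => rintro _ ⟨op, hmem, _⟩; simp at hmem
  | cons op rest ih =>
    intro hsub hex
    by_cases hin : PySem.Chars.isIn op body = true
    · simp only [pvALoop, hin, if_true, List.any_eq_true]
      refine ⟨g, hg, ?_⟩
      rw [pvSplit_head body op (pvOps_ne_nil op (hsub op List.mem_cons_self))]
      apply (PySem.Chars.startswith_iff _ _).mpr
      obtain ⟨h, sep', rfl⟩ : ∃ h sep', op = h :: sep' := by
        cases op with
        | nil => exact absurd rfl (pvOps_ne_nil [] (hsub [] List.mem_cons_self))
        | cons a b => exact ⟨a, b, rfl⟩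
      exact pvBefore_keeps_prefix h sep' g
        (pvOps_head_not_in_group _ (hsub _ List.mem_cons_self) g hg h (by simp)) body hgp
    · simp only [pvALoop, hin, if_false]
      obtain ⟨op', hmem, hinf⟩ := hex
      rcases List.mem_cons.mp hmem with rfl | hmem'
      · exact absurd ((PySem.Chars.isIn_iff_infix _ _).mpr hinf) hin
      · exact ih (fun o ho => hsub o (List.mem_cons_of_mem _ ho)) ⟨op', hmem', hinf⟩

-- partition at the first ':' characterised: head = name and found, iff name++[':'] prefixes body
theorem pvPart_iff : ∀ (body name : List Char), ':' ∉ name →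
    ((name ++ [':']) <+: body ↔ (pvPartColon body).1 = name ∧ (pvPartColon body).2.1 = true) := by
  intro body
  induction body with
  | nil =>
    intro name _
    constructor
    · intro h; have := h.length_le; simp at this
    · rintro ⟨_, h2⟩; simp [pvPartColon] at h2
  | cons c rest ih =>
    intro name hname
    by_cases hc : c = ':'
    · subst hc
      simp only [pvPartColon, if_pos rfl]
      constructor
      · intro h
        cases name with
        | nil => exact ⟨rfl, rfl⟩
        | cons a t =>
          have : a = ':' := (List.cons_prefix_cons.mp (by simpa using h)).1
          exact absurd (this ▸ List.mem_cons_self) hname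
      · rintro ⟨h1, _⟩
        exact h1 ▸ List.cons_prefix_cons.mpr ⟨rfl, List.nil_prefix⟩
    · simp only [pvPartColon, if_neg hc]
      cases name with
      | nil =>
        constructor
        · intro h
          have : ':' = c := by simpa using h
          exact absurd this.symm hc
        · rintro ⟨h1, _⟩; simp at h1
      | cons a t =>
        have hht : ':' ∉ t := fun hm => hname (List.mem_cons_of_mem _ hm)
        constructor
        · intro h
          obtain ⟨hac, ht⟩ := List.cons_prefix_cons.mp (by simpa using h)
          obtain ⟨h1, h2⟩ := (ih t hht).mp ht
          exact ⟨by simp [hac, h1], h2⟩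
        · rintro ⟨h1, h2⟩
          simp only [Prod.mk.injEq, List.cons.injEq] at h1
          obtain ⟨hca, h1'⟩ := h1
          have := (ih t hht).mpr ⟨h1', h2⟩
          exact hca ▸ List.cons_prefix_cons.mpr ⟨rfl, this⟩

-- the common characterisation: cs = '-' :: body with a group prefixing body and '=' occurring in body
def pvPhi (cs : List Char) : Prop :=
  ∃ body, cs = '-' :: body ∧ (∃ g ∈ pvGroups, g <+: body) ∧ ['='] <:+: body

theorem pvA_iff (arg : String) : is_non_xmp_write_arg_py arg = true ↔ pvPhi arg.toList := by
  simp only [is_non_xmp_write_arg_py]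
  generalize arg.toList = cs
  constructor
  · intro h
    by_cases hguard : (!PySem.Chars.startswith cs ['-'] || PySem.Chars.len cs < 2) = true
    · rw [hguard] at h; simp at h
    · rw [Bool.not_eq_true] at hguard
      rw [hguard] at h
      simp only [Bool.false_eq_true, if_false] at h
      have hsw : PySem.Chars.startswith cs ['-'] = true := by
        rcases hx : PySem.Chars.startswith cs ['-'] with _ | _
        · simp [hx] at hguard
        · rfl
      obtain ⟨body, rfl⟩ : ∃ body, cs = '-' :: body := by
        obtain ⟨r, hr⟩ := (PySem.Chars.startswith_iff _ _).mp hsw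
        exact ⟨r, by simpa using hr.symm⟩
      have hbody : PySem.Chars.slice ('-' :: body) (some 1) none = body := by
        rw [PySem.Chars.slice_eq_listSlice, PySem.List.slice_from _ (by norm_num : (0:Int) ≤ 1)]
        simp
      rw [hbody] at h
      obtain ⟨⟨op, hop, hinf⟩, hg⟩ := pvALoop_true body pvOps pvOps_ne_nil h
      exact ⟨body, rfl, hg, (pvOps_eq_infix op hop).trans hinf⟩
  · rintro ⟨body, rfl, ⟨g, hg, hgp⟩, heq⟩
    have hgne : g ≠ [] := by
      obtain ⟨n, hn, rfl⟩ := pvGroups_form g hg; simp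
    obtain ⟨r, rfl⟩ := hgp
    have hgp : g <+: g ++ r := List.prefix_append g r
    generalize hb : g ++ r = body at *
    have h1 : PySem.Chars.startswith ('-' :: body) ['-'] = true :=
      (PySem.Chars.startswith_iff _ _).mpr (List.cons_prefix_cons.mpr ⟨rfl, List.nil_prefix⟩)
    have h2 : ¬ PySem.Chars.len ('-' :: body) < 2 := by
      subst hb
      simp only [PySem.Chars.len, List.length_cons, List.length_append]
      cases g with
      | nil => exact absurd rfl hgne
      | cons a b => simp; omega
    have hguard : (!PySem.Chars.startswith ('-' :: body) ['-'] || PySem.Chars.len ('-' :: body) < 2) = false := by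
      simp only [h1, Bool.not_true, Bool.false_or, decide_eq_true_eq]; simpa using h2
    rw [hguard]
    simp only [Bool.false_eq_true, if_false]
    have hbody : PySem.Chars.slice ('-' :: body) (some 1) none = body := by
      rw [PySem.Chars.slice_eq_listSlice, PySem.List.slice_from _ (by norm_num : (0:Int) ≤ 1)]
      simp
    rw [hbody]
    exact pvALoop_of body g hg hgp pvOps (fun _ h => h) ⟨['='], by decide, heq⟩

theorem pvB_iff (arg : String) : is_non_xmp_write_arg_py_alt arg = true ↔ pvPhi arg.toList := by
  simp only [is_non_xmp_write_arg_py_alt]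
  generalize arg.toList = cs
  constructor
  · intro h
    by_cases hguard : (PySem.Chars.len cs < 2 || !(PySem.List.pyGet? cs 0 == some '-')) = true
    · rw [hguard] at h; simp at h
    · rw [Bool.not_eq_true] at hguard
      rw [hguard] at h
      simp only [Bool.false_eq_true, if_false, Bool.and_eq_true, List.any_eq_true, beq_iff_eq] at h
      obtain ⟨⟨hfound, hin⟩, n, hn, hne⟩ := h
      obtain ⟨body, rfl⟩ : ∃ body, cs = '-' :: body := by
        cases cs with
        | nil => simp [PySem.Chars.len] at hguard
        | cons c rest =>
          have hc : c = '-' := by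
            simp [PySem.Chars.len, PySem.List.pyGet?, PySem.List.pyIdx?] at hguard
            tauto
          exact ⟨rest, by rw [hc]⟩
      have hbody : PySem.Chars.slice ('-' :: body) (some 1) none = body := by
        rw [PySem.Chars.slice_eq_listSlice, PySem.List.slice_from _ (by norm_num : (0:Int) ≤ 1)]
        simp
      rw [hbody] at hfound hne
      obtain ⟨hcol, hg⟩ := pvNames_form n hn
      have hpre : (n ++ [':']) <+: body := (pvPart_iff body n hcol).mpr ⟨hne.symm, hfound⟩
      have hinf : ['='] <:+: ('-' :: body) := (PySem.Chars.isIn_iff_infix _ _).mp hin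
      have hinb : ['='] <:+: body := by
        rcases List.infix_cons_iff.mp hinf with hpr | htl
        · exact absurd (List.cons_prefix_cons.mp hpr).1 (by decide)
        · exact htl
      exact ⟨body, rfl, ⟨n ++ [':'], hg, hpre⟩, hinb⟩
  · rintro ⟨body, rfl, ⟨g, hg, hgp⟩, heq⟩
    obtain ⟨n, hn, rfl⟩ := pvGroups_form g hg
    obtain ⟨hcol, _⟩ := pvNames_form n hn
    have hbne : body ≠ [] := by
      intro hb
      have := hgp.length_le
      simp [hb] at this
    have hguard : (PySem.Chars.len ('-' :: body) < 2 || !(PySem.List.pyGet? ('-' :: body) 0 == some '-')) = false := by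
      have hlen : ¬ PySem.Chars.len ('-' :: body) < 2 := by
        simp only [PySem.Chars.len, List.length_cons]
        cases body with
        | nil => exact absurd rfl hbne
        | cons a b => simp
      have hget : (PySem.List.pyGet? ('-' :: body) 0 == some '-') = true := by
        simp [PySem.List.pyGet?, PySem.List.pyIdx?]
      simp only [hget, Bool.not_true, Bool.or_false, decide_eq_true_eq]; simpa using hlen
    rw [hguard]
    simp only [Bool.false_eq_true, if_false]
    have hbody : PySem.Chars.slice ('-' :: body) (some 1) none = body := by
      rw [PySem.Chars.slice_eq_listSlice, PySem.List.slice_from _ (by norm_num : (0:Int) ≤ 1)]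
      simp
    rw [hbody]
    obtain ⟨h1, h2⟩ := (pvPart_iff body n hcol).mp hgp
    have hin : PySem.Chars.isIn ['='] ('-' :: body) = true :=
      (PySem.Chars.isIn_iff_infix _ _).mpr (heq.trans (List.suffix_cons '-' body).isInfix)
    simp only [Bool.and_eq_true, List.any_eq_true, beq_iff_eq]
    exact ⟨⟨h2, hin⟩, n, hn, h1.symm⟩

theorem pvMain (arg : String) : is_non_xmp_write_arg_py arg = is_non_xmp_write_arg_py_alt arg := by
  rw [Bool.eq_iff_iff, pvA_iff, pvB_iff]

-- ===== VERDICT (by name: the statement is the Claim_ definition above) =====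
theorem is_non_xmp_write_arg_py_spec : Claim_equal_is_non_xmp_write_arg_py := by
  intro arg _
  unfold Spec_is_non_xmp_write_arg_py
  exact pvMain arg
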